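-- pv_equiv track=rewrite | github.com/Tejash16/veritas | backend/app/services/enhanced_ai_service.py | _get_relevant_excel_sample
-- ===== SOURCE A (Python) =====
-- from typing import Dict, Any, List, Tuple, Optional
--
-- def _get_relevant_excel_sample(excel_values: List[Dict], pdf_batch: List[Dict]) -> List[Dict]:
--     """Get relevant Excel sample based on PDF batch content"""
--     sample_size = min(150, len(excel_values))  # Increased sample size
--
--     # Extract keywords from PDF batch for relevance filtering
--     pdf_keywords = set()
--     for pdf_item in pdf_batch:
--         context = pdf_item.get("business_context", "").lower()
--         pdf_keywords.update(context.split())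
--         value = str(pdf_item.get("value", "")).lower()
--         pdf_keywords.update(value.split())
--
--     # Prioritize Excel values that might be relevant
--     if pdf_keywords:
--         scored_excel = []
--         for excel_item in excel_values:
--             score = 0
--             excel_context = excel_item.get("business_context", "").lower()
--             excel_value = str(excel_item.get("value", "")).lower()
--
--             # Score based on keyword matches
--             for keyword in pdf_keywords:
--                 if keyword in excel_context or keyword in excel_value:
--                     score += 1
--
--             scored_excel.append((score, excel_item))
--
--         # Sort by relevance score and take top samples
--         scored_excel.sort(key=lambda x: x[0], reverse=True)
--         relevant_sample = [item for score, item in scored_excel[:sample_size]]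
--
--         # If we have enough relevant samples, return them
--         if len(relevant_sample) >= sample_size // 2:
--             return relevant_sample
--
--     # Fallback: return a stratified sample
--     return excel_values[:sample_size]
-- ===== SOURCE B (Python) =====
-- def _get_relevant_excel_sample(excel_values, pdf_batch):
--     """Bucket (counting) sort by keyword-match score instead of a comparison sort."""
--     sample_size = min(150, len(excel_values))
--
--     keywords = set()
--     for pdf_item in pdf_batch:
--         keywords.update(pdf_item.get("business_context", "").lower().split())
--         keywords.update(str(pdf_item.get("value", "")).lower().split())
--
--     if not keywords:
--         return excel_values[:sample_size]
--
--     # Scores lie in 0..len(keywords): bucket rows by score (stable), then read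
--     # the buckets from highest score to lowest -- this IS the stable descending
--     # order, with no comparison sort.
--     buckets = {}
--     for excel_item in excel_values:
--         ctx = excel_item.get("business_context", "").lower()
--         val = str(excel_item.get("value", "")).lower()
--         score = sum(1 for k in keywords if k in ctx or k in val)
--         buckets.setdefault(score, []).append(excel_item)
--
--     out = []
--     for s in range(len(keywords), -1, -1):
--         out.extend(buckets.get(s, []))
--     return out[:sample_size]
-- ===== Notes on version B (the rewrite author's own statement) =====
-- stated objective: alternative
-- what changed: Replaces A's comparison sort (sorted(..., reverse=True)) of the scored rows by a stable bucket/counting sort over the score range 0..len(keywords), reading buckets from highest score down; the stable descending order and the top-sample slice are identical.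
import Mathlib
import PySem

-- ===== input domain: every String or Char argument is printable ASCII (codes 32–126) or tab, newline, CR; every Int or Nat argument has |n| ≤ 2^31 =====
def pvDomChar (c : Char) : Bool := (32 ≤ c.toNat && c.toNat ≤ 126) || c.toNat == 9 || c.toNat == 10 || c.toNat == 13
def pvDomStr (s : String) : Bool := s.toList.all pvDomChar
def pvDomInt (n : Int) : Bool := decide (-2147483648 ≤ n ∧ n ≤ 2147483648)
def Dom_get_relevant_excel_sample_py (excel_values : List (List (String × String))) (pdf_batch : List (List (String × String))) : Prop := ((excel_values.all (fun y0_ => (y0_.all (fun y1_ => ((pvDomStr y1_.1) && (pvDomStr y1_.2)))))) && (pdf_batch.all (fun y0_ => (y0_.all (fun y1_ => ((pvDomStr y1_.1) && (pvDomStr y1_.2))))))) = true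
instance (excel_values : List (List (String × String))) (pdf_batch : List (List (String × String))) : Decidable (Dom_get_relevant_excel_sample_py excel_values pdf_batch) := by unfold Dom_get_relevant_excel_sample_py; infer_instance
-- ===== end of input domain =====

-- B replaces A's comparison sort of keyword-match scores by a stable bucket (counting) sort
-- over the score range 0..len(keywords); same return value, different algorithm.

-- ===== PORT A =====
-- Python's inner 'for keyword in pdf_keywords' iterates a set in hash order; its result is a
-- pure COUNT, which is order-independent, so folding the Set in insertion order is exact.
-- 'str(item.get("value", ""))' is the identity here: the value is typed String.
def get_relevant_excel_sample_py (excel_values : List (List (String × String))) (pdf_batch : List (List (String × String))) : List (List (String × String)) :=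
  let sample_size : Int := min 150 (PySem.List.len excel_values)
  let pdf_keywords : PySem.Set String :=
    pdf_batch.foldl (fun kw pdf_item =>
      let context := PySem.Str.lower ((PySem.Dict.ofList pdf_item).getD "business_context" "")
      let kw := PySem.Set.update kw (PySem.Str.split₀ context)
      let value := PySem.Str.lower ((PySem.Dict.ofList pdf_item).getD "value" "")
      PySem.Set.update kw (PySem.Str.split₀ value)) PySem.Set.empty
  if pdf_keywords ≠ [] then
    let scored_excel : List (Int × List (String × String)) :=
      excel_values.foldl (fun acc excel_item =>
        let excel_context := PySem.Str.lower ((PySem.Dict.ofList excel_item).getD "business_context" "")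
        let excel_value := PySem.Str.lower ((PySem.Dict.ofList excel_item).getD "value" "")
        let score : Int := pdf_keywords.foldl (fun sc keyword =>
          if PySem.Str.isIn keyword excel_context || PySem.Str.isIn keyword excel_value then
            sc + 1 else sc) 0
        acc ++ [(score, excel_item)]) []
    let sorted_excel := PySem.List.sorted scored_excel (fun x => x.1) true
    let relevant_sample := (PySem.List.slice sorted_excel none (some sample_size)).map (fun p => p.2)
    if PySem.List.len relevant_sample ≥ PySem.Int.floordiv sample_size 2 then
      relevant_sample
    else
      PySem.List.slice excel_values none (some sample_size)
  else
    PySem.List.slice excel_values none (some sample_size)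

-- ===== PORT B =====
def pvField (item : List (String × String)) (k : String) : String :=
  PySem.Str.lower ((PySem.Dict.ofList item).getD k "")

def pvScore (kw : PySem.Set String) (item : List (String × String)) : Int :=
  (kw.countP (fun k => PySem.Str.isIn k (pvField item "business_context") ||
                       PySem.Str.isIn k (pvField item "value")) : Int)

def get_relevant_excel_sample_py_alt (excel_values : List (List (String × String))) (pdf_batch : List (List (String × String))) : List (List (String × String)) :=
  let sample_size : Int := min 150 (PySem.List.len excel_values)
  let keywords : PySem.Set String :=
    pdf_batch.foldl (fun kw pdf_item =>
      PySem.Set.update (PySem.Set.update kw (PySem.Str.split₀ (pvField pdf_item "business_context")))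
        (PySem.Str.split₀ (pvField pdf_item "value"))) PySem.Set.empty
  if keywords = [] then
    PySem.List.slice excel_values none (some sample_size)
  else
    let buckets : PySem.Dict Int (List (List (String × String))) :=
      excel_values.foldl (fun d excel_item =>
        d.modify (pvScore keywords excel_item) [] (· ++ [excel_item])) PySem.Dict.empty
    let out := (PySem.List.pyRange (PySem.List.len keywords) (-1) (-1)).foldl
      (fun out s => out ++ buckets.getD s []) []
    PySem.List.slice out none (some sample_size)

-- ===== PRECONDITION & SPEC =====
def Spec_get_relevant_excel_sample_py (excel_values : List (List (String × String))) (pdf_batch : List (List (String × String))) (out : List (List (String × String))) : Prop := out = get_relevant_excel_sample_py_alt excel_values pdf_batch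
instance (excel_values : List (List (String × String))) (pdf_batch : List (List (String × String))) (out : List (List (String × String))) : Decidable (Spec_get_relevant_excel_sample_py excel_values pdf_batch out) := by unfold Spec_get_relevant_excel_sample_py; infer_instance

-- ===== CLAIM (what is proved, stated in full; the proofs are below) =====
def Claim_equal_get_relevant_excel_sample_py : Prop := ∀ (excel_values : List (List (String × String))) (pdf_batch : List (List (String × String))), Dom_get_relevant_excel_sample_py excel_values pdf_batch → Spec_get_relevant_excel_sample_py excel_values pdf_batch (get_relevant_excel_sample_py excel_values pdf_batch)

-- ===== LEMMAS AND PROOFS =====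

-- inserting an element that every list member should precede: it goes to the front
lemma insertBy_of_forall_before {α : Type} (bef : α → α → Bool) (x : α) (ys : List α)
    (h : ∀ y ∈ ys, bef x y = true) : PySem.List.insertBy bef x ys = x :: ys := by
  cases ys with
  | nil => rfl
  | cons y ys => simp [PySem.List.insertBy, h y (by simp)]

-- inserting past a prefix none of whose members the element precedes
lemma insertBy_append_of_forall_not_before {α : Type} (bef : α → α → Bool) (x : α)
    (a b : List α) (h : ∀ y ∈ a, bef x y = false) :
    PySem.List.insertBy bef x (a ++ b) = a ++ PySem.List.insertBy bef x b := by
  induction a with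
  | nil => rfl
  | cons y a ih =>
    simp [PySem.List.insertBy, h y (by simp)]
    exact ih (fun z hz => h z (by simp [hz]))

-- A stable DESCENDING sort by an Int key is the concatenation, over any strictly
-- descending list ds covering all keys, of the (order-preserving) key buckets.
lemma sorted_key_rev_eq_buckets {α : Type} (ds : List Int) (hds : ds.Pairwise (· > ·)) :
    ∀ (l : List (Int × α)), (∀ p ∈ l, p.1 ∈ ds) →
    PySem.List.sorted l (fun p => p.1) true
      = ds.flatMap (fun d => l.filter (fun p => p.1 == d)) := by
  intro l
  induction l using List.reverseRecOn with
  | nil => intro _; simp [PySem.List.sorted]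
  | append_singleton l x ih =>
    intro hl
    have hmem : x.1 ∈ ds := hl x (by simp)
    obtain ⟨s, t, hst⟩ := List.append_of_mem hmem
    have hpw := hst ▸ hds
    rw [List.pairwise_append] at hpw
    have hs_gt : ∀ d ∈ s, x.1 < d := fun d hd => hpw.2.2 d hd x.1 (by simp)
    have ht_lt : ∀ d ∈ t, d < x.1 := fun d hd => (List.pairwise_cons.mp hpw.2.1).1 d hd
    have hsort : PySem.List.sorted (l ++ [x]) (fun p => p.1) true
        = PySem.List.insertBy (fun a b => decide (b.1 < a.1)) x
            (PySem.List.sorted l (fun p => p.1) true) := by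
      rw [PySem.List.sorted_rev_eq_foldl_insertBy, List.foldl_append,
        ← PySem.List.sorted_rev_eq_foldl_insertBy]
      rfl
    rw [hsort, ih (fun p hp => hl p (by simp [hp])), hst]
    have hfilter_hi : ∀ d ∈ s, (l ++ [x]).filter (fun p => p.1 == d) = l.filter (fun p => p.1 == d) := by
      intro d hd
      have : (x.1 == d) = false := by simp [Int.ne_of_lt (hs_gt d hd)]
      simp [List.filter_append, this]
    have hfilter_lo : ∀ d ∈ t, (l ++ [x]).filter (fun p => p.1 == d) = l.filter (fun p => p.1 == d) := by
      intro d hd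
      have : (x.1 == d) = false := by simp [Int.ne_of_gt (ht_lt d hd)]
      simp [List.filter_append, this]
    have hx : (l ++ [x]).filter (fun p => p.1 == x.1) = l.filter (fun p => p.1 == x.1) ++ [x] := by
      simp [List.filter_append]
    rw [List.flatMap_append, List.flatMap_cons, List.flatMap_append, List.flatMap_cons,
      List.flatMap_congr hfilter_hi, List.flatMap_congr hfilter_lo, hx]
    -- the insertion lands exactly at the end of bucket x.1
    rw [← List.append_assoc,
      insertBy_append_of_forall_not_before _ x
        (s.flatMap (fun d => l.filter (fun p => p.1 == d)) ++ l.filter (fun p => p.1 == x.1))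
        (t.flatMap (fun d => l.filter (fun p => p.1 == d)))
        (by
          intro y hy
          rcases List.mem_append.mp hy with hy | hy
          · obtain ⟨d, hd, hyf⟩ := List.mem_flatMap.mp hy
            have : y.1 = d := by simpa using (List.mem_filter.mp hyf).2
            simp [this, not_lt.mpr (le_of_lt (hs_gt d hd))]
          · have : y.1 = x.1 := by simpa using (List.mem_filter.mp hy).2
            simp [this]),
      insertBy_of_forall_before _ x _
        (by
          intro y hy
          obtain ⟨d, hd, hyf⟩ := List.mem_flatMap.mp hy
          have : y.1 = d := by simpa using (List.mem_filter.mp hyf).2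
          simp [this, ht_lt d hd])]
    simp

-- ===== VERDICT (by name: the statement is the Claim_ definition above) =====
theorem get_relevant_excel_sample_py_spec : Claim_equal_get_relevant_excel_sample_py := by
  unfold Claim_equal_get_relevant_excel_sample_py Spec_get_relevant_excel_sample_py
  intro ev pb _
  unfold get_relevant_excel_sample_py get_relevant_excel_sample_py_alt
  simp only [pvField]
  set kw : PySem.Set String := pb.foldl (fun kw pdf_item =>
    PySem.Set.update (PySem.Set.update kw (PySem.Str.split₀ (PySem.Str.lower ((PySem.Dict.ofList pdf_item).getD "business_context" ""))))
      (PySem.Str.split₀ (PySem.Str.lower ((PySem.Dict.ofList pdf_item).getD "value" "")))) PySem.Set.empty with hkw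
  by_cases hke : kw = []
  · simp [hke]
  · simp only [hke, ite_not, if_false]
    have hscore : ∀ r : List (String × String),
        List.foldl (fun sc keyword =>
          if (PySem.Str.isIn keyword (PySem.Str.lower ((PySem.Dict.ofList r).getD "business_context" "")) ||
              PySem.Str.isIn keyword (PySem.Str.lower ((PySem.Dict.ofList r).getD "value" ""))) = true then
            sc + 1 else sc) 0 kw = pvScore kw r := by
      intro r
      rw [PySem.List.foldl_if_add_one]
      simp [pvScore, pvField]
    simp only [hscore]
    rw [PySem.List.foldl_append_singleton_eq_map (fun r => (pvScore kw r, r)) ev []]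
    simp only [List.nil_append]
    set pairs := ev.map (fun r => (pvScore kw r, r)) with hpairs
    set ds := PySem.List.pyRange (PySem.List.len kw) (-1) (-1) with hds
    have hds_pw : ds.Pairwise (· > ·) := by
      rw [hds, PySem.List.pyRange_neg_one_eq_reverse]
      simpa [List.pairwise_reverse] using PySem.List.pairwise_lt_pyRange_one (-1 + 1) (PySem.List.len kw + 1)
    have hmem : ∀ p ∈ pairs, p.1 ∈ ds := by
      intro p hp
      rw [hds, PySem.List.mem_pyRange_neg_one]
      obtain ⟨r, _, rfl⟩ := List.mem_map.mp hp
      have hle := List.countP_le_length (l := kw)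
        (p := fun k => PySem.Str.isIn k (pvField r "business_context") || PySem.Str.isIn k (pvField r "value"))
      simp only [pvScore, PySem.List.len_eq]
      omega
    have hsorted := sorted_key_rev_eq_buckets ds hds_pw pairs hmem
    have hbfold : ev.foldl (fun d r => d.modify (pvScore kw r) [] (· ++ [r])) PySem.Dict.empty
        = pairs.foldl (fun d p => d.modify p.1 [] (· ++ [p.2])) PySem.Dict.empty := by
      rw [hpairs, List.foldl_map]
    have hbucket : ∀ s : Int,
        (ev.foldl (fun d r => d.modify (pvScore kw r) [] (· ++ [r])) PySem.Dict.empty).getD s []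
          = (pairs.filter (fun p => p.1 == s)).map (fun p => p.2) := by
      intro s
      rw [hbfold, PySem.Dict.getD_foldl_modify_append]
      simp
    simp only [hbucket]
    rw [PySem.List.foldl_append_eq_flatMap, List.nil_append]
    set ss : Int := min 150 (PySem.List.len ev) with hss
    have hss0 : 0 ≤ ss := by simp [hss, PySem.List.len_eq]
    have hssle : ss.toNat ≤ ev.length := by
      simp only [hss, PySem.List.len_eq]
      omega
    have hlenrel : PySem.List.len
        (List.map (fun p => p.2) (PySem.List.slice (PySem.List.sorted pairs (fun x => x.1) true) none (some ss)))
          = ss := by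
      rw [PySem.List.slice_to _ hss0]
      have hlp : pairs.length = ev.length := by simp [hpairs]
      simp [PySem.List.len_eq, PySem.List.length_sorted, hlp]
      omega
    have hcond : PySem.List.len
        (List.map (fun p => p.2) (PySem.List.slice (PySem.List.sorted pairs (fun x => x.1) true) none (some ss)))
          ≥ PySem.Int.floordiv ss 2 := by
      rw [hlenrel, PySem.Int.floordiv_eq_ediv_of_pos (by norm_num)]
      omega
    rw [if_pos hcond, hsorted, PySem.List.slice_to _ hss0, PySem.List.slice_to _ hss0,
      List.map_take, List.map_flatMap]
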